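-- pv_equiv track=rewrite | github.com/nattaweesa/ces_sale_operation_system | backend/app/api/boqs.py | _looks_item_code
-- ===== SOURCE A (Python) =====
-- def _cell_text(v: object) -> str:
--     if v is None:
--         return ""
--     return str(v).strip()
--
-- def _looks_item_code(v: object) -> bool:
--     txt = _cell_text(v)
--     if not txt:
--         return False
--     if len(txt) < 3:
--         return False
--     has_alpha = any(c.isalpha() for c in txt)
--     has_digit = any(c.isdigit() for c in txt)
--     return has_alpha and has_digit
-- ===== SOURCE B (Python) =====
-- def _cell_text(v: object) -> str:
--     if v is None:
--         return ""
--     return str(v).strip()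
--
-- def _looks_item_code(v: object) -> bool:
--     txt = _cell_text(v)
--     if len(txt) < 3:
--         return False
--     has_alpha = False
--     has_digit = False
--     for c in txt:
--         if c.isalpha():
--             has_alpha = True
--         elif c.isdigit():
--             has_digit = True
--         if has_alpha and has_digit:
--             return True
--     return False
-- ===== Notes on version B (the rewrite author's own statement) =====
-- stated objective: alternative
-- what changed: Replaces the two independent any() scans over the stripped text with a single fused loop maintaining has_alpha/has_digit booleans and returning early once both are seen; the empty-string guard is folded into the length guard.
import Mathlib
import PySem

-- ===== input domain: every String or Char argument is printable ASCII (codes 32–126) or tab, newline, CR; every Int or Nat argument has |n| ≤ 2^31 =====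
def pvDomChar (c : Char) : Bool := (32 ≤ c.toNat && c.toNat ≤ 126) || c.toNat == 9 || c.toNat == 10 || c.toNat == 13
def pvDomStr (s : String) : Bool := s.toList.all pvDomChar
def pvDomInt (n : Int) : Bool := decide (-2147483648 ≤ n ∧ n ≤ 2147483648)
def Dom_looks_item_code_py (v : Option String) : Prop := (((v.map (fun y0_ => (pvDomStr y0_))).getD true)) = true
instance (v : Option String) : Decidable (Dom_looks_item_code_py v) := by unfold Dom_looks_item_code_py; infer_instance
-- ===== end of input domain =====

-- B fuses A's two separate any() scans into a single early-exit loop carrying has_alpha/has_digit (objective: alternative; return value only).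


-- ===== PORT A =====
-- _cell_text, shared verbatim by both Pythons
def cell_text_py (v : Option String) : String :=
  match v with
  | none => ""
  | some s => PySem.Str.strip s

def looks_item_code_py (v : Option String) : Bool :=
  let txt := cell_text_py v
  if txt.toList.isEmpty then false          -- "if not txt"
  else if PySem.Str.len txt < 3 then false
  else
    let has_alpha := txt.toList.any (fun c => PySem.Chars.isalpha c)
    let has_digit := txt.toList.any (fun c => PySem.Chars.isdigit c)
    has_alpha && has_digit

-- ===== PORT B =====
-- B's fused single loop with early exit once both flags are set
def looks_item_code_go : List Char → Bool → Bool → Bool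
  | [], _, _ => false
  | c :: rest, ha, hd =>
    let ha' := if PySem.Chars.isalpha c then true else ha
    let hd' := if !PySem.Chars.isalpha c && PySem.Chars.isdigit c then true else hd
    if ha' && hd' then true else looks_item_code_go rest ha' hd'

def looks_item_code_py_alt (v : Option String) : Bool :=
  let txt := cell_text_py v
  if PySem.Str.len txt < 3 then false
  else looks_item_code_go txt.toList false false

-- ===== PRECONDITION & SPEC =====
def Spec_looks_item_code_py (v : Option String) (out : Bool) : Prop := out = looks_item_code_py_alt v
instance (v : Option String) (out : Bool) : Decidable (Spec_looks_item_code_py v out) := by unfold Spec_looks_item_code_py; infer_instance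

-- ===== CLAIM (what is proved, stated in full; the proofs are below) =====
def Claim_equal_looks_item_code_py : Prop := ∀ (v : Option String), Dom_looks_item_code_py v → Spec_looks_item_code_py v (looks_item_code_py v)

-- ===== LEMMAS AND PROOFS =====
theorem isdigit_of_isalpha (c : Char) (h : PySem.Chars.isalpha c = true) :
    PySem.Chars.isdigit c = false := by
  simp only [PySem.Chars.isalpha, PySem.Chars.isupper, PySem.Chars.islower,
    PySem.Chars.isdigit, Char.le_def, UInt32.le_iff_toNat_le, Bool.or_eq_true,
    Bool.and_eq_true, decide_eq_true_eq, Bool.and_eq_false_iff,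
    decide_eq_false_iff_not, not_le] at *
  have h0 : ('0'.val).toNat = 48 := rfl
  have h9 : ('9'.val).toNat = 57 := rfl
  have hA : ('A'.val).toNat = 65 := rfl
  have hZ : ('Z'.val).toNat = 90 := rfl
  have ha : ('a'.val).toNat = 97 := rfl
  have hz : ('z'.val).toNat = 122 := rfl
  omega

-- loop invariant: while not both flags are set, the fused loop computes the two any-scans
theorem looks_item_code_go_spec (l : List Char) (ha hd : Bool) (h : ¬ (ha = true ∧ hd = true)) :
    looks_item_code_go l ha hd =
      ((ha || l.any (fun c => PySem.Chars.isalpha c)) &&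
       (hd || l.any (fun c => PySem.Chars.isdigit c))) := by
  induction l generalizing ha hd with
  | nil =>
    simp only [looks_item_code_go, List.any_nil, Bool.or_false]
    cases ha <;> cases hd <;> simp_all
  | cons c rest ih =>
    simp only [looks_item_code_go, List.any_cons]
    cases hac : PySem.Chars.isalpha c with
    | true =>
      have hdc := isdigit_of_isalpha c hac
      cases hd with
      | true => simp [hdc]
      | false => simp [hdc, ih true false (by simp)]
    | false =>
      cases hdc : PySem.Chars.isdigit c with
      | false => simp [h, ih ha hd h]
      | true =>
        cases ha with
        | true => simp
        | false => simp [ih false true (by simp)]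

-- ===== VERDICT (by name: the statement is the Claim_ definition above) =====
theorem looks_item_code_py_spec : Claim_equal_looks_item_code_py := by
  intro v _
  unfold Spec_looks_item_code_py looks_item_code_py looks_item_code_py_alt
  set txt := cell_text_py v with htxt
  have hlt : txt.toList.length = txt.length := String.length_toList
  by_cases hlen : txt.toList.length < 3
  · have hl : PySem.Str.len txt < 3 := by
      rw [PySem.Str.len_eq]; omega
    have hln : txt.length < 3 := by omega
    simp [hln]
  · have hemp : ¬ txt.toList.isEmpty = true := by
      simp only [List.isEmpty_iff]
      intro h; rw [h] at hlen; simp at hlen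
    have hl : ¬ PySem.Str.len txt < 3 := by
      rw [PySem.Str.len_eq]; omega
    simp only [if_neg hemp, if_neg hl]
    rw [looks_item_code_go_spec _ false false (by simp)]
    simp
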